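-- pv_equiv track=rewrite | github.com/shay-ff/cpp-files | Codeforces/Live/1001/C_Cirno_and_Operations.py | max_sequence_sum
-- ===== SOURCE A (Python) =====
-- def max_sequence_sum(arr):
--     n = len(arr)
--
--     # Initialize max sum tracking
--     max_sum = max(arr)
--
--     # If single element, return it directly
--     if n == 1:
--         return max_sum
--
--     # Compute all possible transformations
--     current = arr.copy()
--
--     # Track seen sequences to prevent infinite loops
--     seen = set(tuple(current))
--     stack = [current]
--
--     while stack:
--         current = stack.pop()
--
--         # Update max sum
--         max_sum = max(max_sum, sum(current))
--
--         # Stop if sequence is of length 1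
--         if len(current) == 1:
--             continue
--
--         # Reverse operation
--         reversed_seq = current[::-1]
--         rev_tuple = tuple(reversed_seq)
--         if rev_tuple not in seen and len(reversed_seq) > 1:
--             seen.add(rev_tuple)
--             stack.append(reversed_seq)
--
--         # Difference sequence operation
--         diff_seq = [current[i+1] - current[i] for i in range(len(current)-1)]
--         diff_tuple = tuple(diff_seq)
--         if diff_tuple not in seen and len(diff_seq) > 1:
--             seen.add(diff_tuple)
--             stack.append(diff_seq)
--
--     return max_sum
-- ===== SOURCE B (Python) =====
-- def max_sequence_sum(arr):
--     # Direct level-by-level computation: no DFS, no stack, no seen set.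
--     # At difference level k>=1 both the sequence and its negation are reachable
--     # (via reverse), so we take max(s, -s); level 0's negation is unreachable.
--     n = len(arr)
--     ans = max(arr)
--     if n == 1:
--         return ans
--     ans = max(ans, sum(arr))
--     cur = arr
--     for _ in range(n - 2):
--         cur = [cur[i + 1] - cur[i] for i in range(len(cur) - 1)]
--         s = sum(cur)
--         ans = max(ans, s, -s)
--     return ans
-- ===== Notes on version B (the rewrite author's own statement) =====
-- stated objective: simpler
-- what changed: Replaces A's DFS over the reverse/difference closure (explicit stack, seen-set with tuple hashing of every visited sequence) by a direct level-by-level scan: ans starts at max(arr) and sum(arr), then for each difference level k=1..n-2 takes max(ans, s, -s) for s the level-k sum, since the reverse/negation closure contributes exactly +/-s at each level k>=1 and only +sum(arr) at level 0; B visits each difference level once instead of ~4 sequence variants per level and pays no tuple-hashing cost.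
-- outside the precondition, e.g. on max_sequence_sum([]): A raises ValueError, B raises ValueError
import Mathlib
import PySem

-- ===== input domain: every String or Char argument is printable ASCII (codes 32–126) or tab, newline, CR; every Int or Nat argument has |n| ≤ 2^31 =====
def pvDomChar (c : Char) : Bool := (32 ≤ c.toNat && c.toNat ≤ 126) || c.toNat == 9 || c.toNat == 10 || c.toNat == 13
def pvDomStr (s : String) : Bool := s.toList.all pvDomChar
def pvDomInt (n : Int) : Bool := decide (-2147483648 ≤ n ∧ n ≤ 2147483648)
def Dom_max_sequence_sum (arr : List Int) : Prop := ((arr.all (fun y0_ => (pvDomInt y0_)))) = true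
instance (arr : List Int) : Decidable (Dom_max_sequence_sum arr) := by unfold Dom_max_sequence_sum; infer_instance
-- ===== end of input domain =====

-- B replaces A's DFS with stack and seen-set by a direct level-by-level scan of the
-- difference sequences, taking both a sum and its negation at each level k ≥ 1.

-- ===== PORT A =====
-- shared helper: the list comprehension [c[i+1] - c[i] for i in range(len(c)-1)],
-- written identically in both Pythons (indices are always in range, so getD's default is never used)
def pyDiff (c : List Int) : List Int :=
  (PySem.List.pyRange 0 ((c.length : Int) - 1) 1).map
    (fun i => PySem.List.pyGetD c (i + 1) 0 - PySem.List.pyGetD c i 0)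

-- the `while stack:` loop; fuel is only a totality guard (proved sufficient below).
-- Python's `seen = set(tuple(current))` is a set of the ELEMENTS of arr (ints), and an int
-- never equals a tuple in Python, so for the tuple-membership tests it is exactly the empty
-- set: the port starts from Set.empty.  stack top = list head (Python pops/appends at the end).
def msLoop (fuel : Nat) (seen : PySem.Set (List Int)) (stack : List (List Int))
    (maxSum : Int) : Int :=
  match fuel, stack with
  | _, [] => maxSum
  | 0, _ => maxSum          -- fuel guard, never reached (see max_sequence_sum_spec)
  | fuel + 1, current :: rest =>
    let maxSum := max maxSum current.sum
    if current.length = 1 then msLoop fuel seen rest maxSum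
    else
      -- reverse operation: current[::-1] (PySem.List.slice?_none_none_neg_one)
      let revSeq := current.reverse
      let seen1 :=
        if ¬ PySem.Set.contains seen revSeq ∧ 1 < revSeq.length
        then PySem.Set.add seen revSeq else seen
      let stack1 :=
        if ¬ PySem.Set.contains seen revSeq ∧ 1 < revSeq.length
        then revSeq :: rest else rest
      -- difference sequence operation
      let dseq := pyDiff current
      let seen2 :=
        if ¬ PySem.Set.contains seen1 dseq ∧ 1 < dseq.length
        then PySem.Set.add seen1 dseq else seen1
      let stack2 :=
        if ¬ PySem.Set.contains seen1 dseq ∧ 1 < dseq.length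
        then dseq :: stack1 else stack1
      msLoop fuel seen2 stack2 maxSum

def max_sequence_sum (arr : List Int) : Int :=
  match PySem.List.max? arr (fun x => x) with
  | none => 0               -- Python raises ValueError on max([]); excluded by Pre_
  | some m0 =>
    if arr.length = 1 then m0
    else msLoop (8 * arr.length + 9) PySem.Set.empty [arr] m0

-- ===== PORT B =====
-- the `for _ in range(n - 2):` loop of Source B
def bGo (j : Nat) (cur : List Int) (ans : Int) : Int :=
  match j with
  | 0 => ans
  | j + 1 =>
    let cur' := pyDiff cur
    let s := cur'.sum
    bGo j cur' (max (max ans s) (-s))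

def max_sequence_sum_alt (arr : List Int) : Int :=
  match PySem.List.max? arr (fun x => x) with
  | none => 0               -- Python raises ValueError on max([]); excluded by Pre_
  | some mx =>
    if arr.length = 1 then mx
    else bGo (arr.length - 2) arr (max mx arr.sum)

-- ===== PRECONDITION & SPEC =====
-- Pre_ excludes only the empty list, on which Python's max(arr) raises ValueError.
def Pre_max_sequence_sum (arr : List Int) : Prop := arr ≠ []
instance (arr : List Int) : Decidable (Pre_max_sequence_sum arr) := by
  unfold Pre_max_sequence_sum; infer_instance
def pvWitness_max_sequence_sum : List Int := [3, -1, 4]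

def Spec_max_sequence_sum (arr : List Int) (out : Int) : Prop := out = max_sequence_sum_alt arr
instance (arr : List Int) (out : Int) : Decidable (Spec_max_sequence_sum arr out) := by
  unfold Spec_max_sequence_sum; infer_instance

-- ===== CLAIM (what is proved, stated in full; the proofs are below) =====
def Claim_equal_max_sequence_sum : Prop :=
  ∀ (arr : List Int), Dom_max_sequence_sum arr → Pre_max_sequence_sum arr →
    Spec_max_sequence_sum arr (max_sequence_sum arr)

-- ===== LEMMAS AND PROOFS =====

theorem pyDiff_eq_zipWith (c : List Int) : pyDiff c = List.zipWith (fun a b => b - a) c c.tail := by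
  apply List.ext_getElem
  · simp [pyDiff, PySem.List.length_pyRange_one]
  · intro i h1 h2
    have hlen : i < c.length - 1 := by
      simp [pyDiff, PySem.List.length_pyRange_one] at h1; omega
    simp only [pyDiff, List.getElem_map, PySem.List.getElem_pyRange_one, zero_add]
    rw [List.getElem_zipWith]
    have e1 : ((i : Int) + 1) = ((i + 1 : Nat) : Int) := by push_cast; ring
    rw [e1, PySem.List.pyGetD_natCast, PySem.List.pyGetD_natCast]
    rw [List.getElem_tail]
    rw [List.getD_eq_getElem _ _ (by omega), List.getD_eq_getElem _ _ (by omega)]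

theorem length_pyDiff (c : List Int) : (pyDiff c).length = c.length - 1 := by
  simp [pyDiff_eq_zipWith]

def negL (c : List Int) : List Int := c.map (fun x => -x)

theorem sum_negL (c : List Int) : (negL c).sum = -c.sum := by
  simp [negL]; exact Eq.symm (List.sum_neg c)

theorem negL_negL (c : List Int) : negL (negL c) = c := by
  simp [negL, List.map_map]

theorem pyDiff_negL (c : List Int) : pyDiff (negL c) = negL (pyDiff c) := by
  simp only [pyDiff_eq_zipWith, negL, ← List.map_tail]
  rw [List.zipWith_map, List.map_zipWith]
  congr 1
  funext a b
  ring

theorem pyDiff_reverse (c : List Int) : pyDiff c.reverse = (negL (pyDiff c)).reverse := by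
  apply List.ext_getElem
  · simp [length_pyDiff, negL]
  · intro i h1 h2
    have hn : i < c.length - 1 := by simp [length_pyDiff] at h1; omega
    simp only [pyDiff_eq_zipWith, negL] at h1 h2 ⊢
    rw [List.getElem_zipWith, List.getElem_tail, List.getElem_reverse, List.getElem_reverse,
        List.getElem_reverse, List.getElem_map, List.getElem_zipWith, List.getElem_tail]
    simp only [List.length_zipWith, List.length_map, List.length_tail]
    simp only [show c.length - 1 - (i + 1) = c.length - 2 - i from by omega,
               show min c.length (c.length - 1) - 1 - i = c.length - 2 - i from by omega]
    simp only [show c.length - 2 - i + 1 = c.length - 1 - i from by omega]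
    ring

def dIter (arr : List Int) : Nat → List Int
  | 0 => arr
  | k + 1 => pyDiff (dIter arr k)

theorem length_dIter (arr : List Int) (k : Nat) : (dIter arr k).length = arr.length - k := by
  induction k with
  | zero => rfl
  | succ k ih => simp [dIter, length_pyDiff, ih]; omega

inductive ReachP (a : List Int) : List Int → Prop
  | base : ReachP a a
  | rev {x : List Int} : ReachP a x → 2 ≤ x.length → ReachP a x.reverse
  | dif {x : List Int} : ReachP a x → 2 ≤ x.length → 2 ≤ (pyDiff x).length → ReachP a (pyDiff x)

/-- every reachable sequence is one of the four variants of some difference level. -/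
theorem reach_form {arr x : List Int} (h : ReachP arr x) :
    ∃ k, x = dIter arr k ∨ x = (dIter arr k).reverse ∨
      (1 ≤ k ∧ (x = negL (dIter arr k) ∨ x = (negL (dIter arr k)).reverse)) := by
  induction h with
  | base => exact ⟨0, Or.inl rfl⟩
  | rev _ _ ih =>
    obtain ⟨k, hk⟩ := ih
    refine ⟨k, ?_⟩
    rcases hk with h | h | ⟨h1, h | h⟩
    · exact Or.inr (Or.inl (by rw [h]))
    · exact Or.inl (by rw [h, List.reverse_reverse])
    · exact Or.inr (Or.inr ⟨h1, Or.inr (by rw [h])⟩)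
    · exact Or.inr (Or.inr ⟨h1, Or.inl (by rw [h, List.reverse_reverse])⟩)
  | dif _ _ _ ih =>
    obtain ⟨k, hk⟩ := ih
    refine ⟨k + 1, ?_⟩
    rcases hk with h | h | ⟨h1, h | h⟩
    · exact Or.inl (by rw [h]; rfl)
    · refine Or.inr (Or.inr ⟨by omega, Or.inr ?_⟩)
      rw [h, pyDiff_reverse]; rfl
    · refine Or.inr (Or.inr ⟨by omega, Or.inl ?_⟩)
      rw [h, pyDiff_negL]; rfl
    · refine Or.inr (Or.inl ?_)
      rw [h, pyDiff_reverse, pyDiff_negL, negL_negL]; rfl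

theorem reach_length {arr x : List Int} (_h : ReachP arr x) (_hx : 2 ≤ x.length)
    (hk : x = dIter arr k ∨ x = (dIter arr k).reverse ∨
      (1 ≤ k ∧ (x = negL (dIter arr k) ∨ x = (negL (dIter arr k)).reverse))) :
    x.length = arr.length - k := by
  rcases hk with h | h | ⟨_, h | h⟩ <;>
    simp [h, length_dIter, negL]

theorem reach_d (arr : List Int) (k : Nat) (hk : k + 2 ≤ arr.length) :
    ReachP arr (dIter arr k) := by
  induction k with
  | zero => exact ReachP.base
  | succ k ih =>
    have h1 : ReachP arr (dIter arr k) := ih (by omega)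
    have := ReachP.dif h1 (by rw [length_dIter]; omega)
      (by show 2 ≤ (pyDiff (dIter arr k)).length; rw [length_pyDiff, length_dIter]; omega)
    exact this

theorem reach_neg (arr : List Int) (k : Nat) (h1 : 1 ≤ k) (hk : k + 2 ≤ arr.length) :
    ReachP arr ((negL (dIter arr k)).reverse) := by
  obtain ⟨j, rfl⟩ : ∃ j, k = j + 1 := ⟨k - 1, by omega⟩
  have hj : ReachP arr (dIter arr j) := reach_d arr j (by omega)
  have hrev : ReachP arr (dIter arr j).reverse :=
    ReachP.rev hj (by rw [length_dIter]; omega)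
  have hd := ReachP.dif hrev (by simp [length_dIter]; omega)
    (by rw [length_pyDiff]; simp [length_dIter]; omega)
  rw [pyDiff_reverse] at hd
  exact hd

theorem dIter_shift (c : List Int) (i : Nat) : dIter (pyDiff c) i = dIter c (i + 1) := by
  induction i with
  | zero => rfl
  | succ i ih => show pyDiff (dIter (pyDiff c) i) = pyDiff (dIter c (i+1)); rw [ih]

theorem le_bGo (j : Nat) (cur : List Int) (ans : Int) : ans ≤ bGo j cur ans := by
  induction j generalizing cur ans with
  | zero => exact le_refl _
  | succ j ih =>
    show ans ≤ bGo j (pyDiff cur) _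
    exact le_trans (le_trans (le_max_left _ _) (le_max_left _ _)) (ih _ _)

theorem bGo_ge (j : Nat) (cur : List Int) (ans : Int) (i : Nat) (h1 : 1 ≤ i) (h2 : i ≤ j) :
    (dIter cur i).sum ≤ bGo j cur ans ∧ -(dIter cur i).sum ≤ bGo j cur ans := by
  induction j generalizing cur ans i with
  | zero => omega
  | succ j ih =>
    show _ ≤ bGo j (pyDiff cur) _ ∧ _ ≤ bGo j (pyDiff cur) _
    rcases Nat.eq_or_lt_of_le h1 with rfl | hi
    · constructor
      · exact le_trans (le_trans (le_max_right _ _) (le_max_left _ _)) (le_bGo _ _ _)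
      · exact le_trans (le_max_right _ _) (le_bGo _ _ _)
    · obtain ⟨i', rfl⟩ : ∃ i', i = i' + 1 := ⟨i - 1, by omega⟩
      have := ih (pyDiff cur) (max (max ans (pyDiff cur).sum) (-(pyDiff cur).sum)) i' (by omega) (by omega)
      rwa [dIter_shift] at this

theorem bGo_attained (j : Nat) (cur : List Int) (ans : Int) :
    bGo j cur ans = ans ∨ ∃ i, 1 ≤ i ∧ i ≤ j ∧
      (bGo j cur ans = (dIter cur i).sum ∨ bGo j cur ans = -(dIter cur i).sum) := by
  induction j generalizing cur ans with
  | zero => exact Or.inl rfl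
  | succ j ih =>
    have h := ih (pyDiff cur) (max (max ans (pyDiff cur).sum) (-(pyDiff cur).sum))
    rw [show bGo (j+1) cur ans
        = bGo j (pyDiff cur) (max (max ans (pyDiff cur).sum) (-(pyDiff cur).sum)) from rfl]
    rcases h with h | ⟨i, hi1, hi2, h⟩
    · rw [h]
      rcases max_choice (max ans (pyDiff cur).sum) (-(pyDiff cur).sum) with h2 | h2 <;> rw [h2]
      · rcases max_choice ans (pyDiff cur).sum with h3 | h3 <;> rw [h3]
        · exact Or.inl rfl
        · exact Or.inr ⟨1, le_refl _, by omega, Or.inl rfl⟩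
      · exact Or.inr ⟨1, le_refl _, by omega, Or.inr rfl⟩
    · refine Or.inr ⟨i + 1, by omega, by omega, ?_⟩
      rwa [dIter_shift] at h

def ChSpec (arr : List Int) (m0 r : Int) : Prop :=
  m0 ≤ r ∧ arr.sum ≤ r ∧
  (∀ k, 1 ≤ k → k + 2 ≤ arr.length → (dIter arr k).sum ≤ r ∧ -(dIter arr k).sum ≤ r) ∧
  (r = m0 ∨ r = arr.sum ∨ ∃ k, 1 ≤ k ∧ k + 2 ≤ arr.length ∧
      (r = (dIter arr k).sum ∨ r = -(dIter arr k).sum))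

theorem ChSpec_unique {arr : List Int} {m0 r1 r2 : Int}
    (h1 : ChSpec arr m0 r1) (h2 : ChSpec arr m0 r2) : r1 = r2 := by
  obtain ⟨a1, b1, c1, d1⟩ := h1
  obtain ⟨a2, b2, c2, d2⟩ := h2
  apply le_antisymm
  · rcases d1 with rfl | rfl | ⟨k, hk1, hk2, rfl | rfl⟩
    · exact a2
    · exact b2
    · exact (c2 k hk1 hk2).1
    · exact (c2 k hk1 hk2).2
  · rcases d2 with rfl | rfl | ⟨k, hk1, hk2, rfl | rfl⟩
    · exact a1
    · exact b1
    · exact (c1 k hk1 hk2).1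
    · exact (c1 k hk1 hk2).2

theorem alt_char (arr : List Int) (hn : 2 ≤ arr.length) (m0 : Int)
    (hm : PySem.List.max? arr (fun x => x) = some m0) :
    ChSpec arr m0 (max_sequence_sum_alt arr) := by
  have hres : max_sequence_sum_alt arr = bGo (arr.length - 2) arr (max m0 arr.sum) := by
    unfold max_sequence_sum_alt
    rw [hm]
    simp only []
    rw [if_neg (by omega)]
  rw [hres]
  refine ⟨?_, ?_, ?_, ?_⟩
  · exact le_trans (le_max_left _ _) (le_bGo _ _ _)
  · exact le_trans (le_max_right _ _) (le_bGo _ _ _)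
  · intro k hk1 hk2
    exact bGo_ge _ _ _ k hk1 (by omega)
  · rcases bGo_attained (arr.length - 2) arr (max m0 arr.sum) with h | ⟨i, hi1, hi2, h⟩
    · rw [h]
      rcases max_choice m0 arr.sum with h2 | h2 <;> rw [h2]
      · exact Or.inl rfl
      · exact Or.inr (Or.inl rfl)
    · exact Or.inr (Or.inr ⟨i, hi1, by omega, h⟩)

def doneP (seen : List (List Int)) (m : Int) (y : List Int) : Prop :=
  y.sum ≤ m ∧ y.reverse ∈ seen ∧ (2 ≤ (pyDiff y).length → pyDiff y ∈ seen)

def InvP (arr : List Int) (m0 : Int) (seen stack : List (List Int)) (m : Int) : Prop :=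
  (∀ y ∈ stack, ReachP arr y ∧ 2 ≤ y.length) ∧
  (∀ y ∈ seen, ReachP arr y ∧ 2 ≤ y.length) ∧
  m0 ≤ m ∧
  (m = m0 ∨ ∃ x, ReachP arr x ∧ 2 ≤ x.length ∧ m = x.sum) ∧
  (∀ y ∈ seen, y ∈ stack ∨ doneP seen m y) ∧
  (arr ∈ stack ∨ doneP seen m arr)

def Slist (arr : List Int) : List (List Int) :=
  (List.range arr.length).flatMap
    (fun k => [dIter arr k, (dIter arr k).reverse, negL (dIter arr k), (negL (dIter arr k)).reverse])

theorem length_Slist (arr : List Int) : (Slist arr).length = 4 * arr.length := by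
  rw [Slist, List.length_flatMap]
  simp [List.map_const']
  ring

theorem mem_Slist {arr x : List Int} (_hn : 2 ≤ arr.length) (hr : ReachP arr x)
    (hx : 2 ≤ x.length) : x ∈ Slist arr := by
  obtain ⟨k, hk⟩ := reach_form hr
  have hlen : x.length = arr.length - k := reach_length hr hx hk
  have hkn : k < arr.length := by omega
  apply List.mem_flatMap.2
  refine ⟨k, List.mem_range.2 hkn, ?_⟩
  rcases hk with h | h | ⟨_, h | h⟩ <;> simp [h]

theorem seen_card {arr : List Int} {seen : List (List Int)} (hn : 2 ≤ arr.length)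
    (h : ∀ y ∈ seen, ReachP arr y ∧ 2 ≤ y.length) (hnd : seen.Nodup) :
    seen.length ≤ 4 * arr.length := by

  have hsub : seen ⊆ Slist arr := fun y hy => mem_Slist hn (h y hy).1 (h y hy).2
  calc seen.length = seen.toFinset.card := (List.toFinset_card_of_nodup hnd).symm
    _ ≤ (Slist arr).toFinset.card := Finset.card_le_card (by
        intro y hy
        simp only [List.mem_toFinset] at hy ⊢
        exact hsub hy)
    _ ≤ (Slist arr).length := List.toFinset_card_le _
    _ = 4 * arr.length := length_Slist arr

theorem inv_step_core
    (arr : List Int) (m0 : Int) (seen rest : List (List Int)) (m : Int)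
    (current : List Int) (seen₂ stack₂ : List (List Int))
    (hInv : InvP arr m0 seen (current :: rest) m)
    (hsub : ∀ y ∈ seen, y ∈ seen₂)
    (hnew : ∀ y ∈ seen₂, y ∈ seen ∨ y ∈ stack₂)
    (hrev : current.reverse ∈ seen₂)
    (hdif : 2 ≤ (pyDiff current).length → pyDiff current ∈ seen₂)
    (hstk : ∀ y ∈ stack₂, y ∈ rest ∨ y = current.reverse ∨ y = pyDiff current)
    (hstk2 : ∀ y ∈ rest, y ∈ stack₂)
    (hdlen : ∀ y ∈ stack₂, 2 ≤ y.length) :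
    InvP arr m0 seen₂ stack₂ (max m current.sum) := by
  obtain ⟨ha, hb, hc, hd, he, hf⟩ := hInv
  have hcur := ha current (List.mem_cons_self)
  have hstack : ∀ y ∈ stack₂, ReachP arr y ∧ 2 ≤ y.length := by
    intro y hy
    refine ⟨?_, hdlen y hy⟩
    rcases hstk y hy with h | rfl | rfl
    · exact (ha y (List.mem_cons_of_mem _ h)).1
    · exact ReachP.rev hcur.1 hcur.2
    · exact ReachP.dif hcur.1 hcur.2 (hdlen _ hy)
  have hdoneCur : doneP seen₂ (max m current.sum) current :=
    ⟨le_max_right _ _, hrev, hdif⟩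
  have hdoneMono : ∀ y, doneP seen m y → doneP seen₂ (max m current.sum) y := by
    intro y ⟨h1, h2, h3⟩
    exact ⟨le_trans h1 (le_max_left _ _), hsub _ h2, fun h => hsub _ (h3 h)⟩
  refine ⟨hstack, ?_, le_trans hc (le_max_left _ _), ?_, ?_, ?_⟩
  · intro y hy
    rcases hnew y hy with h | h
    · exact hb y h
    · exact hstack y h
  · rcases max_choice m current.sum with h | h <;> rw [h]
    · rcases hd with h2 | h2
      · exact Or.inl h2
      · exact Or.inr h2
    · exact Or.inr ⟨current, hcur.1, hcur.2, rfl⟩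
  · intro y hy
    rcases hnew y hy with h | h
    · rcases he y h with h2 | h2
      · rcases List.mem_cons.1 h2 with rfl | h3
        · exact Or.inr hdoneCur
        · exact Or.inl (hstk2 y h3)
      · exact Or.inr (hdoneMono y h2)
    · exact Or.inl h
  · rcases hf with h | h
    · rcases List.mem_cons.1 h with rfl | h3
      · exact Or.inr hdoneCur
      · exact Or.inl (hstk2 _ h3)
    · exact Or.inr (hdoneMono _ h)

theorem msLoop_final (arr : List Int) (m0 : Int) (hn : 2 ≤ arr.length) :
    ∀ (fuel : Nat) (seen stack : List (List Int)) (m : Int),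
      InvP arr m0 seen stack m → seen.Nodup →
      stack.length ≤ seen.length + 1 →
      2 * (4 * arr.length - seen.length) + stack.length < fuel →
      ∃ seen', InvP arr m0 seen' [] (msLoop fuel seen stack m) := by
  intro fuel
  induction fuel with
  | zero => intro seen stack m _ _ _ hf; omega
  | succ fuel ih =>
    intro seen stack m hInv hnd hsl hf
    cases stack with
    | nil => exact ⟨seen, by simpa [msLoop] using hInv⟩
    | cons current rest =>
      have hcur := hInv.1 current List.mem_cons_self
      have hrest : ∀ y ∈ rest, ReachP arr y ∧ 2 ≤ y.length :=
        fun y hy => hInv.1 y (List.mem_cons_of_mem _ hy)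
      have hne : ¬ (current.length = 1) := by omega
      have hrevlen : 1 < current.reverse.length := by
        rw [List.length_reverse]; omega
      have hslen : seen.length ≤ 4 * arr.length := seen_card hn hInv.2.1 hnd
      simp only [List.length_cons] at hsl hf
      by_cases h1 : current.reverse ∈ seen
      · have hC1 : ¬ (¬ PySem.Set.contains seen current.reverse = true ∧
            1 < current.reverse.length) := by
          simp [h1]
        by_cases h2 : pyDiff current ∉ seen ∧ 1 < (pyDiff current).length
        · -- B2: only the difference sequence is pushed
          have hC2 : ¬ PySem.Set.contains seen (pyDiff current) = true ∧
              1 < (pyDiff current).length := by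
            simpa [PySem.Set.contains_iff] using h2
          have heq : msLoop (fuel + 1) seen (current :: rest) m
              = msLoop fuel (PySem.Set.add seen (pyDiff current)) (pyDiff current :: rest)
                  (max m current.sum) := by
            simp only [msLoop]
            rw [if_neg hne, if_neg hC1, if_neg hC1, if_pos hC2, if_pos hC2]
          rw [heq]
          have hI2 : InvP arr m0 (PySem.Set.add seen (pyDiff current))
              (pyDiff current :: rest) (max m current.sum) := by
            apply inv_step_core arr m0 seen rest m current _ _ hInv
            · intro y hy; exact (PySem.Set.mem_add _ _ _).2 (Or.inl hy)
            · intro y hy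
              rcases (PySem.Set.mem_add _ _ _).1 hy with h | rfl
              · exact Or.inl h
              · exact Or.inr List.mem_cons_self
            · exact (PySem.Set.mem_add _ _ _).2 (Or.inl h1)
            · intro _; exact (PySem.Set.mem_add _ _ _).2 (Or.inr rfl)
            · intro y hy
              rcases List.mem_cons.1 hy with rfl | h
              · exact Or.inr (Or.inr rfl)
              · exact Or.inl h
            · intro y hy; exact List.mem_cons_of_mem _ hy
            · intro y hy
              rcases List.mem_cons.1 hy with rfl | h
              · omega
              · exact (hrest y h).2
          have hnd2 : (PySem.Set.add seen (pyDiff current)).Nodup := PySem.Set.nodup_add _ _ hnd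
          have hlen2 : (PySem.Set.add seen (pyDiff current)).length = seen.length + 1 := by
            rw [PySem.Set.add_of_not_mem h2.1]; simp
          have hcard2 : seen.length + 1 ≤ 4 * arr.length := by
            have := seen_card hn hI2.2.1 hnd2
            omega
          exact ih _ _ _ hI2 hnd2 (by simp [hlen2]; omega) (by rw [hlen2]; simp; omega)
        · -- B1: nothing is pushed
          have hC2 : ¬ (¬ PySem.Set.contains seen (pyDiff current) = true ∧
              1 < (pyDiff current).length) := by
            simpa [PySem.Set.contains_iff] using h2
          have heq : msLoop (fuel + 1) seen (current :: rest) m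
              = msLoop fuel seen rest (max m current.sum) := by
            simp only [msLoop]
            rw [if_neg hne, if_neg hC1, if_neg hC1, if_neg hC2, if_neg hC2]
          rw [heq]
          have hI2 : InvP arr m0 seen rest (max m current.sum) := by
            apply inv_step_core arr m0 seen rest m current _ _ hInv
            · intro y hy; exact hy
            · intro y hy; exact Or.inl hy
            · exact h1
            · intro hdl
              rcases Decidable.not_and_iff_not_or_not.1 h2 with h | h
              · exact Decidable.not_not.1 h
              · omega
            · intro y hy; exact Or.inl hy
            · intro y hy; exact hy
            · intro y hy; exact (hrest y hy).2
          exact ih _ _ _ hI2 hnd (by omega) (by omega)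
      · -- reverse is pushed
        have hC1 : ¬ PySem.Set.contains seen current.reverse = true ∧
            1 < current.reverse.length := by
          refine ⟨by simp [h1], hrevlen⟩
        have hlen1 : (PySem.Set.add seen current.reverse).length = seen.length + 1 := by
          rw [PySem.Set.add_of_not_mem h1]; simp
        have hnd1 : (PySem.Set.add seen current.reverse).Nodup := PySem.Set.nodup_add _ _ hnd
        by_cases h2 : pyDiff current ∉ PySem.Set.add seen current.reverse ∧
            1 < (pyDiff current).length
        · -- B4: both pushed
          have hC2 : ¬ PySem.Set.contains (PySem.Set.add seen current.reverse)
              (pyDiff current) = true ∧ 1 < (pyDiff current).length := by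
            simpa [PySem.Set.contains_iff] using h2
          have heq : msLoop (fuel + 1) seen (current :: rest) m
              = msLoop fuel (PySem.Set.add (PySem.Set.add seen current.reverse) (pyDiff current))
                  (pyDiff current :: current.reverse :: rest) (max m current.sum) := by
            simp only [msLoop]
            rw [if_neg hne, if_pos hC1, if_pos hC1, if_pos hC2, if_pos hC2]
          rw [heq]
          have hI2 : InvP arr m0
              (PySem.Set.add (PySem.Set.add seen current.reverse) (pyDiff current))
              (pyDiff current :: current.reverse :: rest) (max m current.sum) := by
            apply inv_step_core arr m0 seen rest m current _ _ hInv
            · intro y hy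
              exact (PySem.Set.mem_add _ _ _).2 (Or.inl ((PySem.Set.mem_add _ _ _).2 (Or.inl hy)))
            · intro y hy
              rcases (PySem.Set.mem_add _ _ _).1 hy with h | rfl
              · rcases (PySem.Set.mem_add _ _ _).1 h with h' | rfl
                · exact Or.inl h'
                · exact Or.inr (List.mem_cons_of_mem _ List.mem_cons_self)
              · exact Or.inr List.mem_cons_self
            · exact (PySem.Set.mem_add _ _ _).2 (Or.inl ((PySem.Set.mem_add _ _ _).2 (Or.inr rfl)))
            · intro _; exact (PySem.Set.mem_add _ _ _).2 (Or.inr rfl)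
            · intro y hy
              rcases List.mem_cons.1 hy with rfl | h
              · exact Or.inr (Or.inr rfl)
              · rcases List.mem_cons.1 h with rfl | h'
                · exact Or.inr (Or.inl rfl)
                · exact Or.inl h'
            · intro y hy; exact List.mem_cons_of_mem _ (List.mem_cons_of_mem _ hy)
            · intro y hy
              rcases List.mem_cons.1 hy with rfl | h
              · omega
              · rcases List.mem_cons.1 h with rfl | h'
                · omega
                · exact (hrest y h').2
          have hnd2 := PySem.Set.nodup_add _ (pyDiff current) hnd1
          have hlen2 : (PySem.Set.add (PySem.Set.add seen current.reverse)
              (pyDiff current)).length = seen.length + 2 := by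
            rw [PySem.Set.add_of_not_mem h2.1]; simp [hlen1]
          have hcard2 : seen.length + 2 ≤ 4 * arr.length := by
            have := seen_card hn hI2.2.1 hnd2
            omega
          exact ih _ _ _ hI2 hnd2 (by simp [hlen2]; omega) (by rw [hlen2]; simp; omega)
        · -- B3: only the reverse is pushed
          have hC2 : ¬ (¬ PySem.Set.contains (PySem.Set.add seen current.reverse)
              (pyDiff current) = true ∧ 1 < (pyDiff current).length) := by
            simpa [PySem.Set.contains_iff] using h2
          have heq : msLoop (fuel + 1) seen (current :: rest) m
              = msLoop fuel (PySem.Set.add seen current.reverse)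
                  (current.reverse :: rest) (max m current.sum) := by
            simp only [msLoop]
            rw [if_neg hne, if_pos hC1, if_pos hC1, if_neg hC2, if_neg hC2]
          rw [heq]
          have hI2 : InvP arr m0 (PySem.Set.add seen current.reverse)
              (current.reverse :: rest) (max m current.sum) := by
            apply inv_step_core arr m0 seen rest m current _ _ hInv
            · intro y hy; exact (PySem.Set.mem_add _ _ _).2 (Or.inl hy)
            · intro y hy
              rcases (PySem.Set.mem_add _ _ _).1 hy with h | rfl
              · exact Or.inl h
              · exact Or.inr List.mem_cons_self
            · exact (PySem.Set.mem_add _ _ _).2 (Or.inr rfl)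
            · intro hdl
              rcases Decidable.not_and_iff_not_or_not.1 h2 with h | h
              · exact Decidable.not_not.1 h
              · omega
            · intro y hy
              rcases List.mem_cons.1 hy with rfl | h
              · exact Or.inr (Or.inl rfl)
              · exact Or.inl h
            · intro y hy; exact List.mem_cons_of_mem _ hy
            · intro y hy
              rcases List.mem_cons.1 hy with rfl | h
              · omega
              · exact (hrest y h).2
          have hcard2 : seen.length + 1 ≤ 4 * arr.length := by
            have := seen_card hn hI2.2.1 hnd1
            omega
          exact ih _ _ _ hI2 hnd1 (by simp [hlen1]; omega) (by rw [hlen1]; simp; omega)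

theorem reach_done (arr : List Int) (m0 r : Int) (seen' : List (List Int))
    (hInv : InvP arr m0 seen' [] r) : ∀ x, ReachP arr x → doneP seen' r x := by
  intro x hx
  induction hx with
  | base =>
    rcases hInv.2.2.2.2.2 with h | h
    · cases h
    · exact h
  | rev _ _ ih =>
    rcases hInv.2.2.2.2.1 _ ih.2.1 with h | h
    · cases h
    · exact h
  | dif _ _ hdl ih =>
    rcases hInv.2.2.2.2.1 _ (ih.2.2 hdl) with h | h
    · cases h
    · exact h

theorem a_char (arr : List Int) (hn : 2 ≤ arr.length) (m0 : Int)
    (hm : PySem.List.max? arr (fun x => x) = some m0) :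
    ChSpec arr m0 (max_sequence_sum arr) := by
  have hres : max_sequence_sum arr
      = msLoop (8 * arr.length + 9) PySem.Set.empty [arr] m0 := by
    unfold max_sequence_sum
    rw [hm]
    simp only []
    rw [if_neg (by omega)]
  have hInv0 : InvP arr m0 PySem.Set.empty [arr] m0 := by
    refine ⟨?_, ?_, le_refl _, Or.inl rfl, ?_, Or.inl List.mem_cons_self⟩
    · intro y hy
      rcases List.mem_cons.1 hy with rfl | h
      · exact ⟨ReachP.base, hn⟩
      · cases h
    · intro y hy; cases hy
    · intro y hy; cases hy
  obtain ⟨seen', hI⟩ := msLoop_final arr m0 hn (8 * arr.length + 9) PySem.Set.empty [arr] m0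
      hInv0 List.nodup_nil (by simp [PySem.Set.empty]) (by simp [PySem.Set.empty]; omega)
  rw [hres]
  refine ⟨hI.2.2.1, ?_, ?_, ?_⟩
  · exact (reach_done _ _ _ _ hI arr ReachP.base).1
  · intro k hk1 hk2
    refine ⟨(reach_done _ _ _ _ hI _ (reach_d arr k hk2)).1, ?_⟩
    have h := (reach_done _ _ _ _ hI _ (reach_neg arr k hk1 hk2)).1
    rwa [List.sum_reverse, sum_negL] at h
  · rcases hI.2.2.2.1 with h | ⟨x, hx, hxl, hxs⟩
    · exact Or.inl h
    · obtain ⟨k, hk⟩ := reach_form hx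
      have hlen : x.length = arr.length - k := reach_length hx hxl hk
      have hkb : k + 2 ≤ arr.length := by omega
      rcases hk with h | h | ⟨h1, h | h⟩
      · rcases Nat.eq_zero_or_pos k with rfl | hk1
        · exact Or.inr (Or.inl (by rw [hxs, h]; rfl))
        · exact Or.inr (Or.inr ⟨k, hk1, hkb, Or.inl (by rw [hxs, h])⟩)
      · rcases Nat.eq_zero_or_pos k with rfl | hk1
        · refine Or.inr (Or.inl ?_)
          rw [hxs, h, List.sum_reverse]; rfl
        · refine Or.inr (Or.inr ⟨k, hk1, hkb, Or.inl ?_⟩)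
          rw [hxs, h, List.sum_reverse]
      · refine Or.inr (Or.inr ⟨k, h1, hkb, Or.inr ?_⟩)
        rw [hxs, h, sum_negL]
      · refine Or.inr (Or.inr ⟨k, h1, hkb, Or.inr ?_⟩)
        rw [hxs, h, List.sum_reverse, sum_negL]

theorem final_eq (arr : List Int) (hpre : arr ≠ []) :
    max_sequence_sum arr = max_sequence_sum_alt arr := by
  obtain ⟨m0, hm⟩ : ∃ m0, PySem.List.max? arr (fun x => x) = some m0 := by
    cases h : PySem.List.max? arr (fun x => x) with
    | none => exact absurd ((PySem.List.max?_eq_none_iff _ _).1 h) hpre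
    | some v => exact ⟨v, rfl⟩
  by_cases hn : arr.length = 1
  · unfold max_sequence_sum max_sequence_sum_alt
    rw [hm]
    simp [hn]
  · have hn2 : 2 ≤ arr.length := by
      have : arr.length ≠ 0 := by simpa using hpre
      omega
    exact ChSpec_unique (a_char arr hn2 m0 hm) (alt_char arr hn2 m0 hm)

-- ===== VERDICT (by name: the statement is the Claim_ definition above) =====
theorem max_sequence_sum_spec : Claim_equal_max_sequence_sum := by
  intro arr _ hpre
  exact final_eq arr hpre
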